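-- pv_equiv track=rewrite | github.com/Ander456/py_program | day113.py | count3
-- ===== SOURCE A (Python) =====
-- def count3(n):
--     def f(n):
--         if n == 0:
--             return 1
--         if n == 1:
--             return 9
--         return f(n-1) * (11-n)
--     return sum(f(n) for n in range(0, n+1))
-- ===== SOURCE B (Python) =====
-- def count3(n):
--     # f(k) = f(k-1)*(11-k) hits the factor (11-11) = 0 at k = 11, so every
--     # term past k = 10 is 0: keep a running product and stop at min(n, 10).
--     total = 0
--     p = 1
--     for k in range(0, min(n, 10) + 1):
--         if k == 1:
--             p = 9
--         elif k >= 2: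
--             p *= 11 - k
--         total += p
--     return total
-- ===== Notes on version B (the rewrite author's own statement) =====
-- stated objective: faster
-- what changed: A recomputes the recursive product f(k) from scratch for every k (and recurses to depth n); B keeps a running product in one loop and stops at k = 10 because the factor (11-k) makes every later term zero, so B is a constant-size loop.
import Mathlib
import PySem

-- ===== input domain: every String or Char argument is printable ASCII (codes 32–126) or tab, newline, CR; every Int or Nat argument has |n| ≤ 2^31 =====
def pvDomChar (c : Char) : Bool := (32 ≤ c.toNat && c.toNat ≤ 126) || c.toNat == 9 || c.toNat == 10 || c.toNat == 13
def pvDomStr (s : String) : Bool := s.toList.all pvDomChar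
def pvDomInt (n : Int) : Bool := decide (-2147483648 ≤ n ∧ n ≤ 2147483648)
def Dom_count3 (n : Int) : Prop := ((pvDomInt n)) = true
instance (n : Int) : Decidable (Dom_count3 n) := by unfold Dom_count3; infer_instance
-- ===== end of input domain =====

-- B replaces A's per-term recursion by one running-product loop capped at k = 10
-- (every later term is zero), turning O(n^2) work into a constant-size loop.

-- ===== PORT A =====
-- A's inner recursive f; it is only ever applied to the nonnegative members of
-- range(0, n+1), so Nat recursion is exact on every call A makes.
def count3_f : Nat → Int
  | 0 => 1
  | 1 => 9
  | (k+2) => count3_f (k+1) * (11 - ((k : Int) + 2))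

def count3 (n : Int) : Int :=
  (PySem.List.pyRange 0 (n+1) 1).foldl (fun acc k => acc + count3_f k.toNat) 0

-- ===== PORT B =====
def count3_alt (n : Int) : Int :=
  ((PySem.List.pyRange 0 (min n 10 + 1) 1).foldl
    (fun (st : Int × Int) k =>
      let p : Int := if k == 1 then 9 else if 2 ≤ k then st.2 * (11 - k) else st.2
      (st.1 + p, p)) (0, 1)).1

-- ===== PRECONDITION & SPEC =====
def Spec_count3 (n : Int) (out : Int) : Prop := out = count3_alt n
instance (n : Int) (out : Int) : Decidable (Spec_count3 n out) := by unfold Spec_count3; infer_instance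

-- ===== CLAIM (what is proved, stated in full; the proofs are below) =====
def Claim_equal_count3 : Prop := ∀ (n : Int), Dom_count3 n → Spec_count3 n (count3 n)

-- ===== LEMMAS AND PROOFS =====
theorem count3_f_eq_zero (k : Nat) (h : 11 ≤ k) : count3_f k = 0 := by
  obtain ⟨m, rfl⟩ : ∃ m, k = 11 + m := ⟨k - 11, by omega⟩
  induction m with
  | zero => decide
  | succ m ih =>
      have : 11 + (m + 1) = (10 + m) + 2 := by omega
      rw [this, count3_f]
      rw [show 10 + m + 1 = 11 + m from by omega, ih (by omega)]
      ring

theorem foldl_tail_zero (l : List Int) (c : Int) (h : ∀ k ∈ l, (11 : Int) ≤ k) :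
    l.foldl (fun acc k => acc + count3_f k.toNat) c = c := by
  induction l generalizing c with
  | nil => rfl
  | cons x xs ih =>
      have hx : (11 : Int) ≤ x := h x (List.mem_cons_self)
      simp only [List.foldl_cons]
      rw [count3_f_eq_zero x.toNat (by omega), add_zero]
      exact ih c (fun k hk => h k (List.mem_cons_of_mem _ hk))

-- ===== VERDICT (by name: the statement is the Claim_ definition above) =====
theorem count3_spec : Claim_equal_count3 := by
  intro n _
  unfold Spec_count3 count3 count3_alt
  rcases lt_or_ge n 0 with hneg | hpos
  · rw [PySem.List.pyRange_one_eq_nil (by omega), PySem.List.pyRange_one_eq_nil (by omega)]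
    rfl
  · by_cases hle : n ≤ 10
    · rw [min_eq_left hle]
      interval_cases n <;> decide
    · rw [min_eq_right (by omega)]
      have hgt : 10 < n := by omega
      rw [PySem.List.pyRange_one_append 0 11 (n+1) (by omega) (by omega), List.foldl_append]
      rw [foldl_tail_zero _ _ (fun k hk => ((PySem.List.mem_pyRange_one).1 hk).1)]
      decide
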